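-- pv_equiv track=rewrite | github.com/YasminaMarjani/GA-python-code | index.py | calc_best_point
-- ===== SOURCE A (Python) =====
-- def calc_best_point(pop):
--     all_results = [item[1] for sublist in pop for item in sublist]
--     data = [item for sublist in pop for item in sublist]
--     min_result = min(all_results)
--     final_best_point = []
--     for x in data:
--         if min_result == x[1]:
--             final_best_point = x[0]
--     return final_best_point
-- ===== SOURCE B (Python) =====
-- def calc_best_point(pop):
--     best = None  # (result, point)
--     for sublist in pop:
--         for point, result in sublist:
--             if best is None or result <= best[0]:
--                 best = (result, point)
--     return best[1]
-- ===== Notes on version B (the rewrite author's own statement) =====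
-- stated objective: simpler
-- what changed: B drops the two intermediate flattened lists and the separate min() pass: one fused loop over pop keeps the (result, point) pair with the smallest result, updating on <= so the last point with the minimum result is kept; Pre_ excludes inputs with no items, where A's min([]) raises.
import Mathlib
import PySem

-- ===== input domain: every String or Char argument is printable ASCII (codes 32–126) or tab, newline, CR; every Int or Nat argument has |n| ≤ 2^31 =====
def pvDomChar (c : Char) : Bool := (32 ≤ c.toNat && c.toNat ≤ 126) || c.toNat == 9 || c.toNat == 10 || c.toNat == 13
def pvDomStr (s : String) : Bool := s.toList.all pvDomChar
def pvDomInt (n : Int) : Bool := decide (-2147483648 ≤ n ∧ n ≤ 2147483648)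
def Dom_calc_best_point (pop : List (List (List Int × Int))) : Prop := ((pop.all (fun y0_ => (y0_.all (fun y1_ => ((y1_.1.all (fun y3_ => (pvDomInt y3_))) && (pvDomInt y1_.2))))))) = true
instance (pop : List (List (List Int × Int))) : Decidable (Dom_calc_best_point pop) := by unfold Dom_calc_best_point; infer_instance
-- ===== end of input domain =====

-- B fuses A's three passes (flatten for results, flatten for items, min, then a rescanning loop)
-- into one loop over pop keeping the (result, point) pair with the smallest result so far (objective: simpler).

-- ===== PORT A =====
def calc_best_point (pop : List (List (List Int × Int))) : List Int :=
  let all_results := (pop.flatMap (fun sublist => sublist)).map (fun item => item.2)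
  let data := pop.flatMap (fun sublist => sublist)
  match PySem.List.min? all_results (fun r => r) with
  | none => []   -- min([]) raises ValueError: excluded by Pre_
  | some min_result =>
      data.foldl (fun final_best_point x =>
        if min_result == x.2 then x.1 else final_best_point) []

-- ===== PORT B =====
-- one step of B's inner loop: state = none (best is None) or some (best_result, best_point)
def pvBStep (best : Option (Int × List Int)) (x : List Int × Int) : Option (Int × List Int) :=
  match best with
  | none => some (x.2, x.1)
  | some (br, bp) => if x.2 ≤ br then some (x.2, x.1) else some (br, bp)

def calc_best_point_alt (pop : List (List (List Int × Int))) : List Int :=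
  match pop.foldl (fun best sublist => sublist.foldl pvBStep best) none with
  | none => []   -- best[1] raises TypeError on an empty input: excluded by Pre_
  | some (_, bp) => bp

-- ===== PRECONDITION & SPEC =====
-- A raises ValueError (min of empty list) when pop contains no item at all; B raises there too.
def Pre_calc_best_point (pop : List (List (List Int × Int))) : Prop :=
  pop.flatMap (fun sublist => sublist) ≠ []
instance (pop : List (List (List Int × Int))) : Decidable (Pre_calc_best_point pop) := by
  unfold Pre_calc_best_point; infer_instance
def pvWitness_calc_best_point : (List (List (List Int × Int))) := [[([1, 2], 5)]]

def Spec_calc_best_point (pop : List (List (List Int × Int))) (out : List Int) : Prop := out = calc_best_point_alt pop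
instance (pop : List (List (List Int × Int))) (out : List Int) : Decidable (Spec_calc_best_point pop out) := by unfold Spec_calc_best_point; infer_instance

-- ===== CLAIM (what is proved, stated in full; the proofs are below) =====
def Claim_equal_calc_best_point : Prop := ∀ (pop : List (List (List Int × Int))), Dom_calc_best_point pop → Pre_calc_best_point pop → Spec_calc_best_point pop (calc_best_point pop)

-- ===== LEMMAS AND PROOFS =====

-- the running minimum is either its initial value or attained in the list
theorem pv_min_attained : ∀ (t : List Int) (a : Int), t.foldl min a = a ∨ t.foldl min a ∈ t := by
  intro t
  induction t with
  | nil => intro a; exact Or.inl rfl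
  | cons b t ih =>
      intro a
      simp only [List.foldl_cons]
      rcases ih (min a b) with h | h
      · rcases min_choice a b with hm | hm
        · exact Or.inl (h.trans hm)
        · exact Or.inr (by rw [h, hm]; exact List.mem_cons_self)
      · exact Or.inr (List.mem_cons_of_mem _ h)

theorem pv_foldl_min_le : ∀ (t : List Int) (a : Int), t.foldl min a ≤ a := by
  intro t
  induction t with
  | nil => intro a; exact le_rfl
  | cons b t ih =>
      intro a
      simp only [List.foldl_cons]
      exact le_trans (ih (min a b)) (min_le_left a b)

-- if the minimum value occurs in the tail, A's last-match fold ignores its initial accumulator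
theorem pv_fold_indep (M : Int) : ∀ (t : List (List Int × Int)) (p q : List Int),
    (∃ z ∈ t, z.2 = M) →
    t.foldl (fun acc z => if M = z.2 then z.1 else acc) p
      = t.foldl (fun acc z => if M = z.2 then z.1 else acc) q := by
  intro t
  induction t with
  | nil => intro p q h; simp at h
  | cons y t ih =>
      intro p q h
      simp only [List.foldl_cons]
      by_cases hy : M = y.2
      · simp [hy]
      · have hmem : ∃ z ∈ t, z.2 = M := by
          rcases h with ⟨z, hz, hzM⟩
          rcases List.mem_cons.mp hz with rfl | hz'
          · exact absurd hzM.symm hy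
          · exact ⟨z, hz', hzM⟩
        rw [if_neg hy, if_neg hy]
        exact ih _ _ hmem

theorem pv_attained_pairs (t : List (List Int × Int)) (a : Int)
    (h : (t.map Prod.snd).foldl min a ≠ a) : ∃ z ∈ t, z.2 = (t.map Prod.snd).foldl min a := by
  rcases pv_min_attained (t.map Prod.snd) a with h' | h'
  · exact absurd h' h
  · rcases List.mem_map.mp h' with ⟨z, hz, hz2⟩
    exact ⟨z, hz, hz2⟩

-- invariant of B's fused loop from a non-None state
theorem pv_run : ∀ (t : List (List Int × Int)) (p : List Int) (m : Int),
    t.foldl pvBStep (some (m, p)) =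
      some ((t.map Prod.snd).foldl min m,
            t.foldl (fun acc z => if ((t.map Prod.snd).foldl min m) = z.2 then z.1 else acc) p) := by
  intro t
  induction t with
  | nil => intro p m; rfl
  | cons y t ih =>
      intro p m
      simp only [List.foldl_cons, List.map_cons]
      by_cases hle : y.2 ≤ m
      · have hmin : min m y.2 = y.2 := by omega
        rw [show pvBStep (some (m, p)) y = some (y.2, y.1) by simp [pvBStep, hle]]
        rw [ih y.1 y.2]
        simp only [hmin]
        by_cases hM : ((t.map Prod.snd).foldl min y.2) = y.2
        · simp [hM]
        · rw [if_neg hM]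
          exact congrArg _ (congrArg₂ Prod.mk rfl (pv_fold_indep _ t _ _ (pv_attained_pairs t y.2 hM)))
      · have hmin : min m y.2 = m := by omega
        rw [show pvBStep (some (m, p)) y = some (m, p) by simp [pvBStep, hle]]
        rw [ih p m]
        simp only [hmin]
        have hne : ¬ ((t.map Prod.snd).foldl min m) = y.2 := by
          have := pv_foldl_min_le (t.map Prod.snd) m
          omega
        rw [if_neg hne]

-- B's nested loops over pop = one loop over the flattened data
theorem pv_flat (pop : List (List (List Int × Int))) (st : Option (Int × List Int)) :
    pop.foldl (fun best sublist => sublist.foldl pvBStep best) st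
      = (pop.flatMap (fun sublist => sublist)).foldl pvBStep st := by
  induction pop generalizing st with
  | nil => rfl
  | cons s pop ih => simp only [List.flatMap_cons, List.foldl_append, List.foldl_cons]; exact ih _

-- ===== VERDICT (by name: the statement is the Claim_ definition above) =====
theorem calc_best_point_spec : Claim_equal_calc_best_point := by
  intro pop _ hpre
  unfold Spec_calc_best_point calc_best_point calc_best_point_alt
  rw [pv_flat]
  unfold Pre_calc_best_point at hpre
  obtain ⟨x, t, hd⟩ : ∃ x t, pop.flatMap (fun sublist => sublist) = x :: t := by
    cases h : pop.flatMap (fun sublist => sublist) with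
    | nil => exact absurd h hpre
    | cons x t => exact ⟨x, t, rfl⟩
  rw [hd]
  simp only [List.map_cons, List.foldl_cons]
  rw [PySem.List.min?_id_cons]
  rw [show pvBStep none x = some (x.2, x.1) from rfl]
  rw [pv_run]
  simp only [beq_iff_eq]
  by_cases he : ((t.map Prod.snd).foldl min x.2) = x.2
  · simp [he]
  · rw [if_neg he]
    exact pv_fold_indep _ t _ _ (pv_attained_pairs t x.2 he)
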